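-- pv_equiv track=rewrite | github.com/thealper2/leetcode-solutions | 0800-0899/0890-Find-and-Replace-Pattern.py | pattern_code_generator
-- ===== SOURCE A (Python) =====
-- def pattern_code_generator(word):
--     pattern_code = ""
--     unique_chars = set()
--     masked = {}
--     n = len(word)
--     idx = 65
--
--     for i in range(n):
--         if word[i] not in unique_chars:
--             unique_chars.add(word[i])
--             char_idx = chr(idx)
--             masked[word[i]] = char_idx
--             idx += 1
--             pattern_code += masked[word[i]]
--         else:
--             pattern_code += masked[word[i]]
--
--     return pattern_code
-- ===== SOURCE B (Python) =====
-- def pattern_code_generator(word):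
--     # code of each char = chr(65 + number of distinct chars before its first occurrence)
--     return ''.join(chr(65 + len(set(word[:word.index(c)]))) for c in word)
-- ===== Notes on version B (the rewrite author's own statement) =====
-- stated objective: alternative
-- what changed: Drops A's incrementally built state (seen-set, char-to-code dict, running index) entirely: B computes each character's code directly from the word's structure, as chr(65 + number of distinct characters strictly before that character's first occurrence), a per-character brute-force rank computation (O(n^2)) instead of A's one-pass table build.
import Mathlib
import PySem

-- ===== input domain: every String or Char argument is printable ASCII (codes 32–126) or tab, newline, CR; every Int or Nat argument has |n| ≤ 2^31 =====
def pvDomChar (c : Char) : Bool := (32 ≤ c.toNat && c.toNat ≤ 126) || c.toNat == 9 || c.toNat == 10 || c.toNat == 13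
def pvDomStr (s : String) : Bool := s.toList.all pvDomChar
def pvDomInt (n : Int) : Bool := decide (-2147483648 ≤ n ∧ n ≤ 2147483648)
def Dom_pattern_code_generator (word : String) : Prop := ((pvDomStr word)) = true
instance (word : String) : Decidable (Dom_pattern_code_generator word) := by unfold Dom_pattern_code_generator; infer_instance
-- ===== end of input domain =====

-- B drops A's incrementally built state (seen-set, dict, running index): it computes each
-- character's code directly as chr(65 + number of distinct characters strictly before that
-- character's first occurrence); a different (O(n^2) brute-force) algorithm, same result.


-- ===== PORT A =====
-- one iteration of A's for-loop; state = (pattern_code, unique_chars, masked, idx)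
def pcgStep (st : List Char × PySem.Set Char × PySem.Dict Char Char × Int) (c : Char) :
    List Char × PySem.Set Char × PySem.Dict Char Char × Int :=
  if !(PySem.Set.contains st.2.1 c) then      -- if word[i] not in unique_chars
    let masked' := st.2.2.1.insert c (Char.ofNat st.2.2.2.toNat)   -- masked[word[i]] = chr(idx)
    (st.1 ++ [masked'.getD c 'A'], PySem.Set.add st.2.1 c, masked', st.2.2.2 + 1)
  else
    (st.1 ++ [st.2.2.1.getD c 'A'], st.2.1, st.2.2.1, st.2.2.2)

def pattern_code_generator (word : String) : String :=
  let cs := word.toList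
  let n : Int := cs.length
  -- for i in range(n): word[i] is always in range (0 ≤ i < n), so pyGetD's default is never used
  let st := (PySem.List.pyRange 0 n 1).foldl
    (fun st i => pcgStep st (PySem.List.pyGetD cs i 'A'))
    ([], PySem.Set.empty, PySem.Dict.empty, 65)
  String.ofList st.1

-- ===== PORT B =====
def pattern_code_generator_alt (word : String) : String :=
  -- ''.join(chr(65 + len(set(word[:word.index(c)]))) for c in word)
  -- c is always a character of word, so word.index(c) never raises: index? is some, default unused
  String.ofList (word.toList.map (fun c =>
    Char.ofNat (65 + (PySem.Set.ofList
      (word.toList.take ((PySem.List.index? word.toList c).getD 0))).length)))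

-- ===== PRECONDITION & SPEC =====
def Spec_pattern_code_generator (word : String) (out : String) : Prop := out = pattern_code_generator_alt word
instance (word : String) (out : String) : Decidable (Spec_pattern_code_generator word out) := by unfold Spec_pattern_code_generator; infer_instance

-- ===== CLAIM (what is proved, stated in full; the proofs are below) =====
def Claim_equal_pattern_code_generator : Prop := ∀ (word : String), Dom_pattern_code_generator word → Spec_pattern_code_generator word (pattern_code_generator word)

-- ===== LEMMAS AND PROOFS =====

-- the canonical code of c relative to the ordered first-occurrence list K
def pcgCode (K : List Char) (c : Char) : Char :=
  Char.ofNat (65 + (PySem.List.index? K c).getD 0)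

-- folding Set.add only ever appends new elements
theorem foldl_add_append (q : List Char) (k : List Char) :
    ∃ t, q.foldl PySem.Set.add k = k ++ t := by
  induction q generalizing k with
  | nil => exact ⟨[], by simp⟩
  | cons c q ih =>
    simp only [List.foldl_cons]
    rcases ih (PySem.Set.add k c) with ⟨t, ht⟩
    by_cases h : c ∈ k
    · exact ⟨t, by simpa [PySem.Set.add, PySem.Set.contains, h] using ht⟩
    · exact ⟨c :: t, by simpa [PySem.Set.add, PySem.Set.contains, h] using ht⟩

-- A's loop invariant: with seen-set k (no duplicates), masked agreeing with pcgCode k on k,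
-- and idx = 65 + |k|, the loop appends exactly the canonical codes w.r.t. the final seen-set
theorem pcgA_invariant (rest : List Char) (pc : List Char) (k : List Char)
    (M : PySem.Dict Char Char) (hknd : k.Nodup)
    (hM : ∀ c ∈ k, M.getD c 'A' = pcgCode k c) :
    (rest.foldl pcgStep (pc, k, M, (65 + (k.length : Int)))).1
      = pc ++ rest.map (pcgCode (rest.foldl PySem.Set.add k)) := by
  induction rest generalizing pc k M with
  | nil => simp
  | cons c rest ih =>
    simp only [List.foldl_cons, List.map_cons]
    by_cases hc : c ∈ k
    · rcases foldl_add_append rest k with ⟨t, ht⟩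
      have hadd : PySem.Set.add k c = k := by simp [PySem.Set.add, PySem.Set.contains, hc]
      have hstep : pcgStep (pc, k, M, (65 + (k.length : Int))) c
          = (pc ++ [M.getD c 'A'], k, M, (65 + (k.length : Int))) := by
        simp [pcgStep, PySem.Set.contains, hc]
      rw [hadd, hstep, ih _ k M hknd hM]
      have : pcgCode (rest.foldl PySem.Set.add k) c = M.getD c 'A' := by
        rw [hM c hc, pcgCode, pcgCode, ht, PySem.List.index?_append_of_mem t hc]
      rw [this, List.append_assoc]
      rfl
    · rcases foldl_add_append rest (k ++ [c]) with ⟨t, ht⟩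
      have hadd : PySem.Set.add k c = k ++ [c] := by
        simp [PySem.Set.add, PySem.Set.contains, hc]
      have h65 : ((65 : Int) + (k.length : Int)).toNat = 65 + k.length := by omega
      set M' := M.insert c (Char.ofNat (65 + k.length)) with hM'
      have hstep : pcgStep (pc, k, M, (65 + (k.length : Int))) c
          = (pc ++ [M'.getD c 'A'], k ++ [c], M', (65 + ((k ++ [c]).length : Int))) := by
        simp [pcgStep, PySem.Set.contains, hc, hM', h65]
        ring
      have hknd' : (k ++ [c]).Nodup := by
        simp [List.nodup_append, hknd]
        intro a ha e
        exact hc (by rwa [e] at ha)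
      have hM2 : ∀ c' ∈ k ++ [c], M'.getD c' 'A' = pcgCode (k ++ [c]) c' := by
        intro c' hc'
        rcases List.mem_append.mp hc' with h | h
        · have hne : c' ≠ c := fun e => hc (e ▸ h)
          rw [hM', PySem.Dict.getD_insert_of_ne _ _ _ hne, hM c' h,
            pcgCode, pcgCode, PySem.List.index?_append_of_mem [c] h]
        · have : c' = c := by simpa using h
          subst this
          rw [hM', PySem.Dict.getD_insert_self, pcgCode,
            PySem.List.index?_append_singleton_self k c' hc]
          rfl
      rw [hstep, ih _ (k ++ [c]) M' hknd' hM2]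
      have hcode : pcgCode (rest.foldl PySem.Set.add (k ++ [c])) c = M'.getD c 'A' := by
        rw [pcgCode, ht, PySem.List.index?_append_of_mem t (by simp : c ∈ k ++ [c]),
          PySem.List.index?_append_singleton_self k c hc]
        rw [hM', PySem.Dict.getD_insert_self]
        rfl
      rw [hadd, hcode, List.append_assoc]
      rfl

-- B's direct rank computation agrees with the canonical code w.r.t. the first-occurrence list:
-- the rank of c in Set.ofList xs equals the number of distinct chars before c's first occurrence
theorem pcgB_code (xs : List Char) (c : Char) (hc : c ∈ xs) :
    Char.ofNat (65 + (PySem.Set.ofList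
        (xs.take ((PySem.List.index? xs c).getD 0))).length)
      = pcgCode (PySem.Set.ofList xs) c := by
  obtain ⟨j, hj⟩ : ∃ j, PySem.List.index? xs c = some j :=
    Option.isSome_iff_exists.mp ((PySem.List.index?_isSome_iff (xs := xs) (v := c)).2 hc)
  obtain ⟨pre, suf, hxs, hlen, hpre⟩ := (PySem.List.index?_eq_some_iff xs c j).1 hj
  have htake : xs.take j = pre := by rw [hxs, ← hlen, List.take_left]
  have hmempre : c ∉ PySem.Set.ofList pre := by
    intro h; exact hpre ((PySem.List.mem_dedup pre c).1 (by rw [PySem.List.dedup_eq_ofList]; exact h))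
  have hadd : PySem.Set.add (PySem.Set.ofList pre) c = PySem.Set.ofList pre ++ [c] := by
    simp [PySem.Set.add, PySem.Set.contains, hmempre]
  have hofl : PySem.Set.ofList xs = (PySem.Set.ofList pre ++ [c])
      ++ (Classical.choose (foldl_add_append suf (PySem.Set.ofList pre ++ [c]))) := by
    rw [hxs, PySem.Set.ofList_eq_foldl, List.foldl_append, List.foldl_cons,
      ← PySem.Set.ofList_eq_foldl, hadd]
    exact Classical.choose_spec (foldl_add_append suf (PySem.Set.ofList pre ++ [c]))
  rw [hj, pcgCode, hofl, PySem.List.index?_append_of_mem _ (by simp : c ∈ PySem.Set.ofList pre ++ [c]),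
    PySem.List.index?_append_singleton_self _ c hmempre]
  simp [htake]

-- ===== VERDICT (by name: the statement is the Claim_ definition above) =====
theorem pattern_code_generator_spec : Claim_equal_pattern_code_generator := by
  intro word _
  simp only [Spec_pattern_code_generator, pattern_code_generator, pattern_code_generator_alt]
  rw [PySem.List.foldl_pyRange_zero_pyGetD' word.toList 'A' pcgStep
      ([], PySem.Set.empty, PySem.Dict.empty, 65)]
  rw [show (([], PySem.Set.empty, PySem.Dict.empty, (65 : Int)) :
        List Char × PySem.Set Char × PySem.Dict Char Char × Int)
      = ([], ([] : List Char), PySem.Dict.empty, (65 + ((List.length (α := Char) []) : Int)))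
    from by simp [PySem.Set.empty]]
  rw [pcgA_invariant word.toList [] [] PySem.Dict.empty List.nodup_nil (by intro c hc; cases hc)]
  rw [← PySem.Set.ofList_eq_foldl, List.nil_append]
  congr 1
  exact List.map_congr_left (fun c hcmem => (pcgB_code word.toList c hcmem).symm)
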